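-- pv_equiv track=rewrite | github.com/claycampbell/InvestBrain | services/document_processor.py | _extract_tables_from_text
-- ===== SOURCE A (Python) =====
-- def _extract_tables_from_text(text):
--     """Extract table-like structures from text"""
--     tables = []
--     lines = text.split('\n')
--
--     current_table = []
--     in_table = False
--
--     for line in lines:
--         line = line.strip()
--         if not line:
--             if current_table and in_table:
--                 tables.append(current_table)
--                 current_table = []
--                 in_table = False
--             continue
--
--         # Check if line looks like a table row (contains multiple columns)
--         if '\t' in line or '  ' in line:
--             if not in_table:
--                 in_table = True
--
--             # Split by tabs or multiple spaces
--             columns = [col.strip() for col in line.replace('\t', '|').split('|') if col.strip()]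
--             if len(columns) > 1:
--                 current_table.append(columns)
--
--     # Add the last table if exists
--     if current_table:
--         tables.append(current_table)
--
--     return tables
-- ===== SOURCE B (Python) =====
-- def _extract_tables_from_text(text):
--     """Extract table-like structures from text"""
--     # Phase 1: segment stripped lines into blocks separated by blank lines
--     blocks = []
--     cur = []
--     for raw in text.split('\n'):
--         ln = raw.strip()
--         if ln:
--             cur.append(ln)
--         else:
--             if cur:
--                 blocks.append(cur)
--             cur = []
--     if cur:
--         blocks.append(cur)
--     # Phase 2: turn each block into its table rows; keep non-empty tables
--     tables = []
--     for block in blocks: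
--         rows = []
--         for ln in block:
--             if '\t' in ln or '  ' in ln:
--                 cols = [c.strip() for c in ln.replace('\t', '|').split('|') if c.strip()]
--                 if len(cols) > 1:
--                     rows.append(cols)
--         if rows:
--             tables.append(rows)
--     return tables
-- ===== Notes on version B (the rewrite author's own statement) =====
-- stated objective: simpler
-- what changed: Replaces A's single-pass state machine (in_table flag, inline flush) with a two-phase pass: first split the lines into blank-separated blocks, then map each block to its table rows, keeping non-empty ones.
import Mathlib
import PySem

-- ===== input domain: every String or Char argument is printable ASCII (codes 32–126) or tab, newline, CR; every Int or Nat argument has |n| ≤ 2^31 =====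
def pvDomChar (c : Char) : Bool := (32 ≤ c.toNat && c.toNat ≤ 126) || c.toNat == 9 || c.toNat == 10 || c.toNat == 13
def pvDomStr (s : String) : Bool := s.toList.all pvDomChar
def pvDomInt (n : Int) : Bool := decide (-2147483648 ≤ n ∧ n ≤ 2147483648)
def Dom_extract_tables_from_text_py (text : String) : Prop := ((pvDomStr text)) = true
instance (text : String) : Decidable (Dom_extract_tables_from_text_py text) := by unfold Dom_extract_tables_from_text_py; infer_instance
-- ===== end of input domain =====

-- B replaces A's in_table state machine by segment-into-blank-separated-blocks then map each block (objective: simpler).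

-- shared helper: [col.strip() for col in line.replace('\t', '|').split('|') if col.strip()]
def pvCols (l : String) : List String :=
  (((PySem.Str.split? (PySem.Str.replace l "\t" "|") "|").getD []).map PySem.Str.strip).filter
    (fun c => c ≠ "")

-- ===== PORT A =====
-- loop body of A's single for-loop (state: tables, current_table, in_table)
def pvStepA (st : List (List (List String)) × List (List String) × Bool) (line : String) :
    List (List (List String)) × List (List String) × Bool :=
  let l := PySem.Str.strip line
  if l = "" then
    if st.2.1 ≠ [] ∧ st.2.2 = true then (st.1 ++ [st.2.1], [], false) else st
  else if PySem.Str.isIn "\t" l || PySem.Str.isIn "  " l then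
    let cols := pvCols l
    if cols.length > 1 then (st.1, st.2.1 ++ [cols], true) else (st.1, st.2.1, true)
  else st

def extract_tables_from_text_py (text : String) : List (List (List String)) :=
  let lines := (PySem.Str.split? text "\n").getD []   -- sep "\n" ≠ "", so split? is exact here
  let st := lines.foldl pvStepA ([], [], false)
  if st.2.1 ≠ [] then st.1 ++ [st.2.1] else st.1

-- ===== PORT B =====
-- phase-1 loop body: group stripped lines into blank-separated blocks
def pvStepB (p : List (List String) × List String) (raw : String) :
    List (List String) × List String :=
  let ln := PySem.Str.strip raw
  if ln ≠ "" then (p.1, p.2 ++ [ln])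
  else if p.2 ≠ [] then (p.1 ++ [p.2], []) else (p.1, [])

-- phase-2 inner loop body: collect the table rows of one block
def pvRowStep (rows : List (List String)) (ln : String) : List (List String) :=
  if PySem.Str.isIn "\t" ln || PySem.Str.isIn "  " ln then
    let cols := pvCols ln
    if cols.length > 1 then rows ++ [cols] else rows
  else rows

-- phase-2 outer loop body: keep a block's rows when non-empty
def pvBlockStep (tables : List (List (List String))) (block : List String) :
    List (List (List String)) :=
  let rows := block.foldl pvRowStep []
  if rows ≠ [] then tables ++ [rows] else tables

def extract_tables_from_text_py_alt (text : String) : List (List (List String)) :=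
  let p := ((PySem.Str.split? text "\n").getD []).foldl pvStepB ([], [])
  let blocks := if p.2 ≠ [] then p.1 ++ [p.2] else p.1
  blocks.foldl pvBlockStep []

-- ===== PRECONDITION & SPEC =====
def Spec_extract_tables_from_text_py (text : String) (out : List (List (List String))) : Prop := out = extract_tables_from_text_py_alt text
instance (text : String) (out : List (List (List String))) : Decidable (Spec_extract_tables_from_text_py text out) := by unfold Spec_extract_tables_from_text_py; infer_instance

-- ===== CLAIM (what is proved, stated in full; the proofs are below) =====
def Claim_equal_extract_tables_from_text_py : Prop := ∀ (text : String), Dom_extract_tables_from_text_py text → Spec_extract_tables_from_text_py text (extract_tables_from_text_py text)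

-- ===== LEMMAS AND PROOFS =====

-- the rows a single (already stripped) line contributes
def pvRowOf (l : String) : List (List String) :=
  if PySem.Str.isIn "\t" l || PySem.Str.isIn "  " l then
    (if (pvCols l).length > 1 then [pvCols l] else [])
  else []

-- reference spec: tables of the remaining lines, given the rows collected so far in the current block
def pvSpecT (cur : List (List String)) : List String → List (List (List String))
  | [] => if cur ≠ [] then [cur] else []
  | l :: ls =>
    if PySem.Str.strip l = "" then (if cur ≠ [] then [cur] else []) ++ pvSpecT [] ls
    else pvSpecT (cur ++ pvRowOf (PySem.Str.strip l)) ls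

def pvRowsOf (block : List String) : List (List String) := block.flatMap pvRowOf

def pvTblOf (block : List String) : List (List (List String)) :=
  if pvRowsOf block ≠ [] then [pvRowsOf block] else []

def pvFinA (st : List (List (List String)) × List (List String) × Bool) :
    List (List (List String)) :=
  if st.2.1 ≠ [] then st.1 ++ [st.2.1] else st.1

lemma pvA_fold (lines : List String) :
    ∀ (tables : List (List (List String))) (cur : List (List String)) (inT : Bool),
    (cur ≠ [] → inT = true) →
    pvFinA (lines.foldl pvStepA (tables, cur, inT)) = tables ++ pvSpecT cur lines := by
  induction lines with
  | nil =>
    intro tables cur inT _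
    simp only [List.foldl_nil, pvSpecT, pvFinA]
    by_cases h : cur = [] <;> simp [h]
  | cons l ls ih =>
    intro tables cur inT hInv
    rw [List.foldl_cons]
    by_cases hb : PySem.Str.strip l = ""
    · by_cases hc : cur = []
      · have hstep : pvStepA (tables, cur, inT) l = (tables, cur, inT) := by
          simp [pvStepA, hb, hc]
        rw [hstep, ih tables cur inT hInv]
        simp [pvSpecT, hb, hc]
      · have hT := hInv hc
        have hstep : pvStepA (tables, cur, inT) l = (tables ++ [cur], [], false) := by
          simp [pvStepA, hb, hc, hT]
        rw [hstep, ih (tables ++ [cur]) [] false (by simp)]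
        simp [pvSpecT, hb, hc]
    · by_cases ht : (PySem.Str.isIn "\t" (PySem.Str.strip l)
          || PySem.Str.isIn "  " (PySem.Str.strip l)) = true
      · by_cases hlen : (pvCols (PySem.Str.strip l)).length > 1
        · have hstep : pvStepA (tables, cur, inT) l
              = (tables, cur ++ [pvCols (PySem.Str.strip l)], true) := by
            simp only [pvStepA]; rw [if_neg hb, if_pos ht, if_pos hlen]
          have hrow : pvRowOf (PySem.Str.strip l) = [pvCols (PySem.Str.strip l)] := by
            simp only [pvRowOf]; rw [if_pos ht, if_pos hlen]
          rw [hstep, ih tables _ true (fun _ => rfl)]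
          simp only [pvSpecT]; rw [if_neg hb, hrow]
        · have hstep : pvStepA (tables, cur, inT) l = (tables, cur, true) := by
            simp only [pvStepA]; rw [if_neg hb, if_pos ht, if_neg hlen]
          have hrow : pvRowOf (PySem.Str.strip l) = [] := by
            simp only [pvRowOf]; rw [if_pos ht, if_neg hlen]
          rw [hstep, ih tables cur true (fun _ => rfl)]
          simp only [pvSpecT]; rw [if_neg hb, hrow, List.append_nil]
      · have hstep : pvStepA (tables, cur, inT) l = (tables, cur, inT) := by
          simp only [pvStepA]; rw [if_neg hb, if_neg ht]
        have hrow : pvRowOf (PySem.Str.strip l) = [] := by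
          simp only [pvRowOf]; rw [if_neg ht]
        rw [hstep, ih tables cur inT hInv]
        simp only [pvSpecT]; rw [if_neg hb, hrow, List.append_nil]

lemma pvRowStep_fold (block : List String) :
    block.foldl pvRowStep [] = pvRowsOf block := by
  have h := PySem.List.foldl_append_eq_flatMap (l := block) (g := pvRowOf)
    (acc := ([] : List (List String)))
  have h2 : block.foldl (fun acc x => acc ++ pvRowOf x) [] = block.flatMap pvRowOf := by
    simpa using h
  rw [pvRowsOf, ← h2]
  apply List.foldl_ext
  intro rows ln _
  simp only [pvRowStep, pvRowOf]
  by_cases ht : (PySem.Str.isIn "\t" ln || PySem.Str.isIn "  " ln) = true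
  · rw [if_pos ht, if_pos ht]
    by_cases hlen : (pvCols ln).length > 1
    · rw [if_pos hlen, if_pos hlen]
    · rw [if_neg hlen, if_neg hlen, List.append_nil]
  · rw [if_neg ht, if_neg ht, List.append_nil]

lemma pvB_phase2 (blocks : List (List String)) (acc : List (List (List String))) :
    blocks.foldl pvBlockStep acc = acc ++ blocks.flatMap pvTblOf := by
  induction blocks generalizing acc with
  | nil => simp
  | cons b bs ih =>
    rw [List.foldl_cons, ih]
    simp only [pvBlockStep, pvRowStep_fold b, List.flatMap_cons, pvTblOf]
    by_cases h : pvRowsOf b = []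
    · rw [if_neg (by simp [h]), if_neg (by simp [h]), List.nil_append]
    · rw [if_pos (by simp [h]), if_pos (by simp [h])]
      simp

def pvFinB (p : List (List String) × List String) : List (List (List String)) :=
  (if p.2 ≠ [] then p.1 ++ [p.2] else p.1).flatMap pvTblOf

lemma pvB_phase1 (lines : List String) :
    ∀ (bs : List (List String)) (bcur : List String),
    pvFinB (lines.foldl pvStepB (bs, bcur))
    = bs.flatMap pvTblOf ++ pvSpecT (pvRowsOf bcur) lines := by
  induction lines with
  | nil =>
    intro bs bcur
    simp only [List.foldl_nil, pvSpecT, pvFinB]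
    by_cases h : bcur = []
    · simp [h, pvRowsOf]
    · rw [if_pos (by simp [h]), List.flatMap_append]
      simp only [List.flatMap_cons, List.flatMap_nil, List.append_nil, pvTblOf]
  | cons l ls ih =>
    intro bs bcur
    rw [List.foldl_cons]
    by_cases hb : PySem.Str.strip l = ""
    · by_cases hc : bcur = []
      · have hstep : pvStepB (bs, bcur) l = (bs, []) := by
          simp only [pvStepB]; rw [if_neg (by simp [hb]), if_neg (by simp [hc])]
        rw [hstep, ih bs []]
        simp [pvSpecT, hb, hc, pvRowsOf]
      · have hstep : pvStepB (bs, bcur) l = (bs ++ [bcur], []) := by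
          simp only [pvStepB]; rw [if_neg (by simp [hb]), if_pos (by simp [hc])]
        rw [hstep, ih (bs ++ [bcur]) []]
        simp only [pvSpecT]
        rw [if_pos hb, List.flatMap_append]
        simp only [List.flatMap_cons, List.flatMap_nil, List.append_nil, pvRowsOf,
          List.flatMap_nil, List.append_assoc]
        congr 2
    · have hstep : pvStepB (bs, bcur) l = (bs, bcur ++ [PySem.Str.strip l]) := by
        simp only [pvStepB]; rw [if_pos (by simp [hb])]
      rw [hstep, ih bs (bcur ++ [PySem.Str.strip l])]
      simp only [pvSpecT]
      rw [if_neg hb, pvRowsOf, pvRowsOf, List.flatMap_append, List.flatMap_cons,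
        List.flatMap_nil, List.append_nil]

-- ===== VERDICT (by name: the statement is the Claim_ definition above) =====
theorem extract_tables_from_text_py_spec : Claim_equal_extract_tables_from_text_py := by
  intro text _
  simp only [Spec_extract_tables_from_text_py, extract_tables_from_text_py,
    extract_tables_from_text_py_alt]
  rw [pvB_phase2]
  have hA := pvA_fold ((PySem.Str.split? text "\n").getD []) [] [] false (by simp)
  have hB := pvB_phase1 ((PySem.Str.split? text "\n").getD []) [] []
  simp only [pvFinA, pvFinB, pvRowsOf, List.flatMap_nil, List.nil_append] at hA hB
  rw [List.nil_append, hA, ← hB]
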